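-- pv_equiv track=rewrite | github.com/siddhantw/the-vortex | scripts/gen_ai/use_cases/locator_reuse_manager.py | _infer_locator_context
-- ===== SOURCE A (Python) =====
-- def _infer_locator_context(locator_name: str, file_path: str) -> str:
--     """Infer locator context from name and file path"""
--     combined = (locator_name + file_path).lower()
--
--     if any(word in combined for word in ['login', 'signin', 'authentication']):
--         return 'login'
--     elif any(word in combined for word in ['checkout', 'cart', 'payment', 'billing']):
--         return 'checkout'
--     elif any(word in combined for word in ['register', 'signup', 'create_account']):
--         return 'registration'
--     elif any(word in combined for word in ['search', 'find', 'query']):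
--         return 'search'
--     elif any(word in combined for word in ['profile', 'account', 'settings']):
--         return 'account'
--     elif any(word in combined for word in ['navigation', 'menu', 'navbar', 'header']):
--         return 'navigation'
--     else:
--         return 'general'
-- ===== SOURCE B (Python) =====
-- _CATEGORIES = ['login', 'checkout', 'registration', 'search', 'account', 'navigation']
--
-- # Flat keyword -> priority rank (rank = index into _CATEGORIES).
-- _KEYWORD_RANK = {
--     'login': 0, 'signin': 0, 'authentication': 0,
--     'checkout': 1, 'cart': 1, 'payment': 1, 'billing': 1,
--     'register': 2, 'signup': 2, 'create_account': 2,
--     'search': 3, 'find': 3, 'query': 3,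
--     'profile': 4, 'account': 4, 'settings': 4,
--     'navigation': 5, 'menu': 5, 'navbar': 5, 'header': 5,
-- }
--
--
-- def _infer_locator_context(locator_name: str, file_path: str) -> str:
--     combined = (locator_name + file_path).lower()
--     best = len(_CATEGORIES)
--     for word, rank in _KEYWORD_RANK.items():
--         if rank < best and word in combined:
--             best = rank
--     return _CATEGORIES[best] if best < len(_CATEGORIES) else 'general'
-- ===== Notes on version B (the rewrite author's own statement) =====
-- stated objective: alternative
-- what changed: Replaced the if/elif cascade of per-group any() tests with a flat keyword->rank map scanned once while keeping a minimum-rank accumulator; the answer is the category of the smallest matched rank, with no grouping and no early return.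
import Mathlib
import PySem

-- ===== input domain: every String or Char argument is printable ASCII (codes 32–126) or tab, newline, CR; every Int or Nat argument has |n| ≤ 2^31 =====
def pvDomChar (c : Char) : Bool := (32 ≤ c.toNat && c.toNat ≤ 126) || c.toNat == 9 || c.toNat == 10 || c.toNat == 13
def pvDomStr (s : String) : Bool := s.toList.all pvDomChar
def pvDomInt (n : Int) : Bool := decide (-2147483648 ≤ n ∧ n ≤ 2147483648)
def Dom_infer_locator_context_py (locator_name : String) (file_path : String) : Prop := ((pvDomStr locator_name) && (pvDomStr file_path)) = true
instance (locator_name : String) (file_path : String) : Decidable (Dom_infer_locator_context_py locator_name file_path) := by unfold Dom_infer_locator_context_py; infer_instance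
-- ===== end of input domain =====

-- B replaces A's if/elif cascade of per-group any() tests with one pass over a flat
-- keyword->rank map keeping a minimum-rank accumulator (alternative; same cost).

-- ===== PORT A =====
def infer_locator_context_py (locator_name : String) (file_path : String) : String :=
  let combined := PySem.Chars.lower (locator_name.toList ++ file_path.toList)
  if ["login", "signin", "authentication"].any (fun w => PySem.Chars.isIn w.toList combined) then "login"
  else if ["checkout", "cart", "payment", "billing"].any (fun w => PySem.Chars.isIn w.toList combined) then "checkout"
  else if ["register", "signup", "create_account"].any (fun w => PySem.Chars.isIn w.toList combined) then "registration"
  else if ["search", "find", "query"].any (fun w => PySem.Chars.isIn w.toList combined) then "search"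
  else if ["profile", "account", "settings"].any (fun w => PySem.Chars.isIn w.toList combined) then "account"
  else if ["navigation", "menu", "navbar", "header"].any (fun w => PySem.Chars.isIn w.toList combined) then "navigation"
  else "general"

-- ===== PORT B =====
def pvCategories : List String :=
  ["login", "checkout", "registration", "search", "account", "navigation"]

-- the flat keyword -> rank dict, in its Python insertion order
def pvKeywordRank : List (String × Nat) :=
  [("login", 0), ("signin", 0), ("authentication", 0),
   ("checkout", 1), ("cart", 1), ("payment", 1), ("billing", 1),
   ("register", 2), ("signup", 2), ("create_account", 2),
   ("search", 3), ("find", 3), ("query", 3),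
   ("profile", 4), ("account", 4), ("settings", 4),
   ("navigation", 5), ("menu", 5), ("navbar", 5), ("header", 5)]

def pvStep (combined : List Char) (best : Nat) (e : String × Nat) : Nat :=
  if e.2 < best ∧ PySem.Chars.isIn e.1.toList combined then e.2 else best

def infer_locator_context_py_alt (locator_name : String) (file_path : String) : String :=
  let combined := PySem.Chars.lower (locator_name.toList ++ file_path.toList)
  let best := pvKeywordRank.foldl (pvStep combined) pvCategories.length
  if best < pvCategories.length then pvCategories.getD best "general" else "general"

-- ===== PRECONDITION & SPEC =====
def Spec_infer_locator_context_py (locator_name : String) (file_path : String) (out : String) : Prop := out = infer_locator_context_py_alt locator_name file_path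
instance (locator_name : String) (file_path : String) (out : String) : Decidable (Spec_infer_locator_context_py locator_name file_path out) := by unfold Spec_infer_locator_context_py; infer_instance

-- ===== CLAIM (what is proved, stated in full; the proofs are below) =====
def Claim_equal_infer_locator_context_py : Prop := ∀ (locator_name : String) (file_path : String), Dom_infer_locator_context_py locator_name file_path → Spec_infer_locator_context_py locator_name file_path (infer_locator_context_py locator_name file_path)

-- ===== LEMMAS AND PROOFS =====

-- folding pvStep over a constant-rank group updates the accumulator to the rank
-- iff the rank beats it and some keyword of the group occurs
theorem foldl_rank_group (c : List Char) (ws : List String) (p best : Nat) :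
    (ws.map (fun w => (w, p))).foldl (pvStep c) best =
      if p < best ∧ ws.any (fun w => PySem.Chars.isIn w.toList c) then p else best := by
  induction ws generalizing best with
  | nil => simp
  | cons w ws ih =>
    simp only [List.map, List.foldl, List.any_cons, pvStep, ih]
    by_cases hp : p < best <;> by_cases hw : PySem.Chars.isIn w.toList c = true <;>
      simp [hp, hw]

theorem infer_locator_context_py_spec : Claim_equal_infer_locator_context_py := by
  intro ln fp _
  unfold Spec_infer_locator_context_py infer_locator_context_py infer_locator_context_py_alt
  have htab : pvKeywordRank =
      (["login", "signin", "authentication"].map (fun w => (w, 0))) ++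
      (["checkout", "cart", "payment", "billing"].map (fun w => (w, 1))) ++
      (["register", "signup", "create_account"].map (fun w => (w, 2))) ++
      (["search", "find", "query"].map (fun w => (w, 3))) ++
      (["profile", "account", "settings"].map (fun w => (w, 4))) ++
      (["navigation", "menu", "navbar", "header"].map (fun w => (w, 5))) := by rfl
  simp only [htab, List.foldl_append, foldl_rank_group]
  generalize (["login", "signin", "authentication"].any _) = g1
  generalize (["checkout", "cart", "payment", "billing"].any _) = g2
  generalize (["register", "signup", "create_account"].any _) = g3
  generalize (["search", "find", "query"].any _) = g4
  generalize (["profile", "account", "settings"].any _) = g5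
  generalize (["navigation", "menu", "navbar", "header"].any _) = g6
  revert g1 g2 g3 g4 g5 g6
  decide
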